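-- pv_equiv track=rewrite | github.com/SukiCZ/Advent-of-Code-2024 | day/19/python_19.py | count_formations
-- ===== SOURCE A (Python) =====
-- from functools import cache
--
-- def count_formations(towels: set[str], patterns: list[str]) -> int:
--     """
--     Recursive function to count the number of formations of a pattern.
--     :param towels: Towels to use to form a pattern.
--     :param patterns: Patterns to form.
--     :return: Number of formations of the pattern.
--     """
--
--     @cache
--     def count_formation(pattern: str) -> int:
--         count = 0
--         for towel in towels:
--             # If the towel is the pattern, increment the count.
--             if towel == pattern:
--                 count += 1
--             # If the pattern starts with the towel, count the number of formations of the rest of the pattern.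
--             if pattern.startswith(towel):
--                 count += count_formation(pattern[len(towel) :])
--         return count
--
--     return sum([count_formation(pattern) for pattern in patterns])
-- ===== SOURCE B (Python) =====
-- def count_formations(towels, patterns):
--     """
--     Iterative bottom-up DP: for each pattern tabulate, from the end of the
--     pattern towards the front, the number of ways each suffix can be written
--     as a concatenation of one or more towels.
--     """
--     total = 0
--     for pattern in patterns:
--         n = len(pattern)
--         # dp[i] = number of ways to write pattern[i:] as one or more towels
--         dp = [0] * (n + 1)
--         for i in range(n - 1, -1, -1):
--             acc = 0
--             for towel in towels:
--                 j = i + len(towel)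
--                 if j <= n and pattern[i:j] == towel:
--                     acc += 1 if j == n else dp[j]
--             dp[i] = acc
--         total += dp[0]
--     return total
-- ===== Notes on version B (the rewrite author's own statement) =====
-- stated objective: alternative
-- what changed: Replaces the memoized top-down recursion over pattern suffixes with an explicit bottom-up DP table indexed by position, filled right-to-left with slice comparisons instead of startswith+recursive calls.
import Mathlib
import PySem

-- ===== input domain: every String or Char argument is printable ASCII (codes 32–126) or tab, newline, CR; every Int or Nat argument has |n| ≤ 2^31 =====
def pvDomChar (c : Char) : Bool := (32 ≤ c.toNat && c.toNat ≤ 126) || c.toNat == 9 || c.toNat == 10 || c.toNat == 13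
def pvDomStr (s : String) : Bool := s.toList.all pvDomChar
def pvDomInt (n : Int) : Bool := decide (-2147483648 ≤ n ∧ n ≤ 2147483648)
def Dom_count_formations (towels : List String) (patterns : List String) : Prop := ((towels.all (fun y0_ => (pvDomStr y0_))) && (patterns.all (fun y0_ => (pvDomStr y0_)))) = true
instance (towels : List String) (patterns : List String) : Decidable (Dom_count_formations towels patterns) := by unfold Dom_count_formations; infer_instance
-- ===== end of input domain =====

-- B replaces A's memoized recursion by an explicit bottom-up suffix DP table; return values agree on Pre_ (no empty towel, where A would recurse forever).

-- ===== PORT A =====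
-- A's memoized recursion, ported as fuel-based recursion on the pattern (the cache
-- does not change values); fuel len(pattern)+1 suffices on Pre_ (no empty towel).
def cfA (towels : List String) : Nat → String → Int
  | 0, _ => 0
  | fuel+1, pattern =>
    towels.foldl (fun count towel =>
      let count := if towel == pattern then count + 1 else count
      if PySem.Str.startswith pattern towel then
        count + cfA towels fuel (PySem.Str.slice pattern (some (PySem.Str.len towel)) none)
      else count) 0

def count_formations (towels : List String) (patterns : List String) : Int :=
  (patterns.map (fun p => cfA towels (p.toList.length + 1) p)).sum

-- ===== PORT B =====
-- inner DP for one pattern: dp[i] = ways to write pattern[i:] as one or more towels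
def cfB (towels : List String) (pattern : String) : Int :=
  let n : Int := PySem.Str.len pattern
  let dp : List Int := List.replicate (n.toNat + 1) 0
  let dp := (PySem.List.pyRange (n - 1) (-1) (-1)).foldl (fun dp i =>
      let acc := towels.foldl (fun acc towel =>
          let j := i + PySem.Str.len towel
          if j ≤ n ∧ PySem.Str.slice pattern (some i) (some j) = towel then
            acc + (if j = n then 1 else PySem.List.pyGetD dp j 0)
          else acc) 0
      dp.set i.toNat acc) dp
  PySem.List.pyGetD dp 0 0

def count_formations_alt (towels : List String) (patterns : List String) : Int :=
  patterns.foldl (fun total pattern => total + cfB towels pattern) 0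

-- ===== PRECONDITION & SPEC =====
-- Pre_ excludes exactly the inputs where A raises: with '' among the towels and at
-- least one pattern, A's recursion never terminates (RecursionError).
def Pre_count_formations (towels : List String) (patterns : List String) : Prop :=
  patterns = [] ∨ "" ∉ towels
instance (towels : List String) (patterns : List String) : Decidable (Pre_count_formations towels patterns) := by unfold Pre_count_formations; infer_instance

def pvWitness_count_formations : List String × List String := (["r", "g", "rg"], ["rg", "rgr"])

def Spec_count_formations (towels : List String) (patterns : List String) (out : Int) : Prop := out = count_formations_alt towels patterns
instance (towels : List String) (patterns : List String) (out : Int) : Decidable (Spec_count_formations towels patterns out) := by unfold Spec_count_formations; infer_instance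

-- ===== CLAIM (what is proved, stated in full; the proofs are below) =====
def Claim_equal_count_formations : Prop := ∀ (towels : List String) (patterns : List String), Dom_count_formations towels patterns → Pre_count_formations towels patterns → Spec_count_formations towels patterns (count_formations towels patterns)

-- ===== LEMMAS AND PROOFS =====

-- char-level reference version of A's recursion
def fA (towels : List String) : Nat → List Char → Int
  | 0, _ => 0
  | fuel+1, cs =>
    towels.foldl (fun count towel =>
      let count := if towel.toList = cs then count + 1 else count
      if towel.toList <+: cs then count + fA towels fuel (cs.drop towel.toList.length) else count) 0

-- cfA computes fA on the character list
theorem cfA_eq_fA (towels : List String) (fuel : Nat) (p : String) :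
    cfA towels fuel p = fA towels fuel p.toList := by
  induction fuel generalizing p with
  | zero => rfl
  | succ f ih =>
    simp only [cfA, fA]
    refine PySem.List.foldl_congr_mem _ _ _ _ ?_
    intro acc t _
    have he : (t == p) = decide (t.toList = p.toList) := by
      by_cases h : t = p
      · subst h; simp
      · have h2 : ¬ t.toList = p.toList := fun hl => h (String.ext hl)
        simp [h, h2]
    have hs : PySem.Str.startswith p t = decide (t.toList <+: p.toList) := by
      rw [PySem.Str.startswith_eq]
      by_cases h : t.toList <+: p.toList
      · simp [h, (PySem.Chars.startswith_iff _ _).2 h]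
      · have hf : PySem.Chars.startswith p.toList t.toList = false :=
          Bool.eq_false_iff.2 (fun hc => h ((PySem.Chars.startswith_iff _ _).1 hc))
        simp [h, hf]
    rw [he, hs, ih]
    by_cases h1 : t.toList = p.toList <;> by_cases h2 : t.toList <+: p.toList <;>
      simp [h1, h2]

-- with no empty towel, fA at ample fuel equals fA at canonical fuel
theorem fA_fuel_irrel (towels : List String) (hne : "" ∉ towels) :
    ∀ fuel cs, cs.length < fuel → fA towels fuel cs = fA towels (cs.length + 1) cs := by
  intro fuel
  induction fuel using Nat.strong_induction_on with
  | _ fuel ih =>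
    intro cs hlt
    match fuel, hlt with
    | f+1, hlt =>
      simp only [fA]
      refine PySem.List.foldl_congr_mem _ _ _ _ ?_
      intro acc t ht
      by_cases hp : t.toList <+: cs
      · have htne : t ≠ "" := fun h => hne (h ▸ ht)
        have hL : 1 ≤ t.toList.length := by
          rcases Nat.eq_zero_or_pos t.toList.length with h0 | h1
          · exact absurd (String.ext (List.eq_nil_of_length_eq_zero h0)) htne
          · exact h1
        have hLle : t.toList.length ≤ cs.length := hp.length_le
        have hdlen : (cs.drop t.toList.length).length = cs.length - t.toList.length := by
          simp
        have h1 : fA towels f (cs.drop t.toList.length)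
            = fA towels ((cs.drop t.toList.length).length + 1) (cs.drop t.toList.length) :=
          ih f (Nat.lt_succ_self _) _ (by omega)
        have h2 : fA towels cs.length (cs.drop t.toList.length)
            = fA towels ((cs.drop t.toList.length).length + 1) (cs.drop t.toList.length) :=
          ih cs.length (by omega) _ (by omega)
        simp only [hp, if_pos]
        rw [h1, h2]
      · simp [hp]

-- empty suffix has no formation (A's f("") = 0) at any positive fuel
theorem fA_nil (towels : List String) (hne : "" ∉ towels) (f : Nat) :
    fA towels (f + 1) [] = 0 := by
  simp only [fA]
  have : ∀ acc t, t ∈ towels →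
      ((fun count towel =>
        let count := if towel.toList = ([] : List Char) then count + 1 else count
        if towel.toList <+: ([] : List Char) then count + fA towels f ([].drop towel.toList.length) else count) acc t) = acc := by
    intro acc t ht
    have htne : t ≠ "" := fun h => hne (h ▸ ht)
    have h0 : t.toList ≠ ([] : List Char) := fun h => htne (String.ext (h.trans rfl))
    have h1 : ¬ t.toList <+: ([] : List Char) := by
      intro h; exact h0 (List.prefix_nil.1 h)
    simp [h0, h1]
  calc List.foldl _ 0 towels = List.foldl (fun acc _ => acc) 0 towels :=
        PySem.List.foldl_congr_mem _ _ _ _ this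
    _ = 0 := by simp

-- canonical-fuel value of a suffix
def R (towels : List String) (cs : List Char) (j : Nat) : Int :=
  fA towels (cs.length - j + 1) (cs.drop j)

-- the inner towel-scan of B computes R at position i, given dp correct above i
theorem cfB_step (towels : List String) (hne : "" ∉ towels) (pattern : String)
    (dp : List Int) (i : Nat)
    (hi : i < pattern.toList.length)
    (hdp : ∀ j : Nat, i < j → j ≤ pattern.toList.length → dp.getD j 0 = R towels pattern.toList j) :
    towels.foldl (fun acc towel =>
        let j := (i : Int) + PySem.Str.len towel
        if j ≤ (PySem.Str.len pattern) ∧ PySem.Str.slice pattern (some (i : Int)) (some j) = towel then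
          acc + (if j = (PySem.Str.len pattern) then 1 else PySem.List.pyGetD dp j 0)
        else acc) 0
      = R towels pattern.toList i := by
  set cs := pattern.toList with hcs
  set n := cs.length with hn
  have hRi : R towels cs i = fA towels ((n - i - 1) + 1 + 1) (cs.drop i) := by
    unfold R; congr 1; omega
  rw [hRi]
  conv_rhs => rw [fA]
  refine PySem.List.foldl_congr_mem _ _ _ _ ?_
  intro acc t ht
  have htne : t ≠ "" := fun h => hne (h ▸ ht)
  have hL : 1 ≤ t.toList.length := by
    rcases Nat.eq_zero_or_pos t.toList.length with h0 | h1
    · exact absurd (String.ext (List.eq_nil_of_length_eq_zero h0)) htne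
    · exact h1
  set L := t.toList.length with hLdef
  have hlenp : PySem.Str.len pattern = (n : Int) := by
    rw [PySem.Str.len_eq]
  have hlent : PySem.Str.len t = (L : Int) := by
    rw [PySem.Str.len_eq]
  have hslice : (PySem.Str.slice pattern (some (i : Int)) (some ((i : Int) + L))).toList
      = (cs.drop i).take L := by
    have h1 : (PySem.Str.slice pattern (some (i : Int)) (some ((i : Int) + L))).toList
        = PySem.List.slice cs (some (i : Int)) (some ((i : Int) + L)) := by
      simp [PySem.Str.slice, hcs]
    rw [h1, show ((i : Int) + L) = ((i + L : Nat) : Int) by push_cast; ring,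
      PySem.List.slice_natCast]
    congr 1
    omega
  -- relate B's condition to the prefix test
  have hcond : ((i : Int) + PySem.Str.len t ≤ PySem.Str.len pattern ∧
      PySem.Str.slice pattern (some (i : Int)) (some ((i : Int) + PySem.Str.len t)) = t)
      ↔ t.toList <+: cs.drop i := by
    rw [hlent, hlenp]
    constructor
    · rintro ⟨hle, heq⟩
      have : (cs.drop i).take L = t.toList := by
        rw [← hslice, heq]
      rw [← this]
      exact List.take_prefix _ _
    · intro hpre
      have hplen : L ≤ (cs.drop i).length := hpre.length_le
      have hdl : (cs.drop i).length = n - i := by simp [hn]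
      constructor
      · omega
      · apply String.ext
        rw [hslice]
        exact List.prefix_iff_eq_take.1 hpre ▸ rfl
  by_cases hpre : t.toList <+: cs.drop i
  · have hc := hcond.2 hpre
    rw [if_pos hc]
    have hplen : L ≤ (cs.drop i).length := hpre.length_le
    have hdl : (cs.drop i).length = n - i := by simp [hn]
    have hdrop : (cs.drop i).drop L = cs.drop (i + L) := by
      rw [List.drop_drop, Nat.add_comm]
    by_cases hend : i + L = n
    · -- towel consumes the rest: t.toList = cs.drop i
      have heq : t.toList = cs.drop i := by
        have h1 := List.prefix_iff_eq_take.1 hpre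
        have h2 : t.toList.length = (cs.drop i).length := by omega
        rw [h2, List.take_length] at h1
        exact h1
      have hjn : (i : Int) + PySem.Str.len t = PySem.Str.len pattern := by
        rw [hlent, hlenp]; omega
      have hz : fA towels (n - i - 1 + 1) (cs.drop (i + L)) = 0 := by
        rw [hend, hn, List.drop_length]
        exact fA_nil towels hne _
      rw [if_pos hjn]
      simp [heq, hz, hdrop]
    · have hlt : i + L < n := by omega
      have hneq : t.toList ≠ cs.drop i := by
        intro h
        have h2 : L = (cs.drop i).length := by rw [hLdef, h]
        omega
      have hjn : ¬ ((i : Int) + PySem.Str.len t = PySem.Str.len pattern) := by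
        rw [hlent, hlenp]
        intro hEq
        have : i + L = n := by exact_mod_cast hEq
        omega
      have hdpval : PySem.List.pyGetD dp ((i : Int) + PySem.Str.len t) 0
          = R towels cs (i + L) := by
        rw [hlent, show ((i : Int) + L) = ((i + L : Nat) : Int) by push_cast; ring,
          PySem.List.pyGetD_natCast]
        exact hdp (i + L) (by omega) (by omega)
      have hfr : fA towels (n - i - 1 + 1) ((cs.drop i).drop L) = R towels cs (i + L) := by
        rw [hdrop]
        unfold R
        have hdl2 : (cs.drop (i + L)).length = n - (i + L) := by simp [hn]
        rw [fA_fuel_irrel towels hne _ _ (by omega), hdl2]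
      rw [if_neg hjn, if_neg hneq, if_pos hpre, hdpval, hfr]
  · have hc : ¬ ((i : Int) + PySem.Str.len t ≤ PySem.Str.len pattern ∧
        PySem.Str.slice pattern (some (i : Int)) (some ((i : Int) + PySem.Str.len t)) = t) :=
      fun h => hpre (hcond.1 h)
    rw [if_neg hc]
    have hneq : t.toList ≠ cs.drop i := fun h => hpre (h ▸ List.prefix_refl _)
    rw [if_neg hneq, if_neg hpre]

-- the countdown fold establishes dp[j] = R j for all j ≤ n
theorem cfB_loop (towels : List String) (hne : "" ∉ towels) (pattern : String) :
    ∀ (k : Nat), k ≤ pattern.toList.length → ∀ dp : List Int,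
      dp.length = pattern.toList.length + 1 →
      (∀ j : Nat, k ≤ j → j ≤ pattern.toList.length → dp.getD j 0 = R towels pattern.toList j) →
      ∀ j : Nat, j ≤ pattern.toList.length →
        ((PySem.List.pyRange ((k : Int) - 1) (-1) (-1)).foldl (fun dp i =>
          let acc := towels.foldl (fun acc towel =>
              let j := i + PySem.Str.len towel
              if j ≤ (PySem.Str.len pattern) ∧ PySem.Str.slice pattern (some i) (some j) = towel then
                acc + (if j = (PySem.Str.len pattern) then 1 else PySem.List.pyGetD dp j 0)
              else acc) 0
          dp.set i.toNat acc) dp).getD j 0 = R towels pattern.toList j := by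
  intro k
  induction k with
  | zero =>
    intro _ dp hlen hdp j hj
    rw [PySem.List.pyRange_neg_one_eq_nil (by omega)]
    exact hdp j (Nat.zero_le _) hj
  | succ k ih =>
    intro hk dp hlen hdp j hj
    have hk' : k ≤ pattern.toList.length := by omega
    rw [show ((k + 1 : Nat) : Int) - 1 = (k : Int) by push_cast; ring]
    rw [PySem.List.pyRange_neg_one_cons (by omega)]
    simp only [List.foldl_cons]
    have hstep := cfB_step towels hne pattern dp k (by omega)
      (fun j hj1 hj2 => hdp j (by omega) hj2)
    refine ih hk' _ ?_ ?_ j hj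
    · rw [List.length_set]; exact hlen
    · intro j' hj1 hj2
      by_cases hjk : j' = k
      · rw [hjk, Int.toNat_natCast, List.getD_eq_getElem?_getD,
          List.getElem?_set_self (by omega), Option.getD_some]
        exact hstep
      · rw [Int.toNat_natCast, List.getD_eq_getElem?_getD,
          List.getElem?_set_ne (fun h => hjk h.symm), ← List.getD_eq_getElem?_getD]
        exact hdp j' (by omega) hj2

-- per-pattern equality
theorem cfB_eq_cfA (towels : List String) (hne : "" ∉ towels) (pattern : String) :
    cfB towels pattern = cfA towels (pattern.toList.length + 1) pattern := by
  rw [cfA_eq_fA]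
  have hbase : ∀ j : Nat, pattern.toList.length ≤ j → j ≤ pattern.toList.length →
      (List.replicate (pattern.toList.length + 1) (0:Int)).getD j 0
        = R towels pattern.toList j := by
    intro j hj1 hj2
    have hjn : j = pattern.toList.length := le_antisymm hj2 hj1
    subst hjn
    rw [List.getD_eq_getElem?_getD, List.getElem?_replicate_of_lt (by omega),
      Option.getD_some]
    unfold R
    rw [Nat.sub_self, List.drop_length]
    exact (fA_nil towels hne 0).symm
  have hloop := cfB_loop towels hne pattern pattern.toList.length (le_refl _)
    (List.replicate (pattern.toList.length + 1) 0)
    (by rw [List.length_replicate]) hbase 0 (Nat.zero_le _)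
  simp only [PySem.Str.len_eq] at hloop
  simp only [cfB, PySem.Str.len_eq, Int.toNat_natCast]
  rw [PySem.List.pyGetD_ofNat']
  rw [hloop]
  unfold R
  rw [Nat.sub_zero, List.drop_zero]

-- ===== VERDICT (by name: the statement is the Claim_ definition above) =====
theorem count_formations_spec : Claim_equal_count_formations := by
  intro towels patterns _ hpre
  unfold Spec_count_formations count_formations count_formations_alt
  rcases hpre with h | h
  · subst h; rfl
  · rw [PySem.List.foldl_add]
    simp only [zero_add]
    congr 1
    apply List.map_congr_left
    intro p _
    exact (cfB_eq_cfA towels h p).symm
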